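-- pv_equiv track=rewrite | github.com/Hershill/UA_50_Metric_CISC471_Project | splc.py | get_rna_and_introns
-- ===== SOURCE A (Python) =====
-- import copy
--
-- def get_rna_and_introns(FASTA_data_set):
--
--     FASTA_data_set_copy = copy.deepcopy(FASTA_data_set)
--
--     rna = ""
--     introns = list()
--
--     rna = sorted(FASTA_data_set_copy.values(), key=len)[-1]
--     # rna = FASTA_data_set_copy[rna_key]
--     #
--     # del FASTA_data_set_copy[rna_key]
--
--     for key, value in FASTA_data_set_copy.items():
--         if value != rna:
--             introns.append(value)
--
--     return rna, introns
-- ===== SOURCE B (Python) =====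
-- import copy
--
-- def get_rna_and_introns(FASTA_data_set):
--     FASTA_data_set_copy = copy.deepcopy(FASTA_data_set)
--
--     values = list(FASTA_data_set_copy.values())
--
--     rna = values[0]
--     for v in values[1:]:
--         if len(v) >= len(rna):
--             rna = v
--
--     introns = [v for v in values if v != rna]
--     return rna, introns
-- ===== Notes on version B (the rewrite author's own statement) =====
-- stated objective: faster
-- what changed: Replaces sorting all values by key=len and taking the last element with a single linear scan that keeps the last value of maximal length (>= update reproduces the stable sort's tie-break), and builds introns with a filter comprehension instead of an append loop.
import Mathlib
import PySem

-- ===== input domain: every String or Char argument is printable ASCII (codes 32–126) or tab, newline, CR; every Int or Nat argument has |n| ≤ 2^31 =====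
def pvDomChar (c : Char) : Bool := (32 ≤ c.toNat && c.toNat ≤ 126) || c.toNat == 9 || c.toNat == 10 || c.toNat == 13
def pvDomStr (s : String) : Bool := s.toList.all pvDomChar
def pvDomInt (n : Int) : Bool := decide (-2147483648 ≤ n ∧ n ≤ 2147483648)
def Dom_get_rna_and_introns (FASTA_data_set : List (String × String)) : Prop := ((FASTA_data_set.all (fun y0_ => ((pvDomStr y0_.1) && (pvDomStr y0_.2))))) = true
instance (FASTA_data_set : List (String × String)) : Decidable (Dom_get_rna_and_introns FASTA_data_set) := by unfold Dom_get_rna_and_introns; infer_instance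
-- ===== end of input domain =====

-- B replaces the sort-by-length of all values by one linear scan keeping the last longest value; return values only (deepcopy makes mutation moot).

-- ===== PORT A =====
def get_rna_and_introns (FASTA_data_set : List (String × String)) : String × List String :=
  let d := PySem.Dict.ofList FASTA_data_set
  -- rna = sorted(d.values(), key=len)[-1]  ([-1] raises IndexError on an empty dict: excluded by Pre_)
  let rna := (PySem.List.pyGet? (PySem.List.sorted d.values (fun v => PySem.Str.len v) false) (-1)).getD ""
  let introns := d.items.foldl (fun acc kv => if kv.2 ≠ rna then acc ++ [kv.2] else acc) []
  (rna, introns)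

-- ===== PORT B =====
def get_rna_and_introns_alt (FASTA_data_set : List (String × String)) : String × List String :=
  let values := (PySem.Dict.ofList FASTA_data_set).values
  match values with
  | [] => ("", [])  -- values[0] raises IndexError in Python: excluded by Pre_
  | v0 :: rest =>
    let rna := rest.foldl (fun best v => if PySem.Str.len best ≤ PySem.Str.len v then v else best) v0
    (rna, values.filter (fun v => v ≠ rna))

-- ===== PRECONDITION & SPEC =====
-- Pre_ excludes only the empty dict, on which A raises IndexError (sorted(...)[-1] of an empty list).
def Pre_get_rna_and_introns (FASTA_data_set : List (String × String)) : Prop := FASTA_data_set ≠ []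
instance (FASTA_data_set : List (String × String)) : Decidable (Pre_get_rna_and_introns FASTA_data_set) := by unfold Pre_get_rna_and_introns; infer_instance
def pvWitness_get_rna_and_introns : (List (String × String)) := [("k1", "ACGU"), ("k2", "AC")]

def Spec_get_rna_and_introns (FASTA_data_set : List (String × String)) (out : String × List String) : Prop := out = get_rna_and_introns_alt FASTA_data_set
instance (FASTA_data_set : List (String × String)) (out : String × List String) : Decidable (Spec_get_rna_and_introns FASTA_data_set out) := by unfold Spec_get_rna_and_introns; infer_instance

-- ===== CLAIM (what is proved, stated in full; the proofs are below) =====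
def Claim_equal_get_rna_and_introns : Prop := ∀ (FASTA_data_set : List (String × String)), Dom_get_rna_and_introns FASTA_data_set → Pre_get_rna_and_introns FASTA_data_set → Spec_get_rna_and_introns FASTA_data_set (get_rna_and_introns FASTA_data_set)

-- ===== LEMMAS AND PROOFS =====

-- insertBy never produces the empty list
theorem pv_insertBy_ne_nil {α : Type} (before : α → α → Bool) (x : α) (ys : List α) :
    PySem.List.insertBy before x ys ≠ [] := by
  cases ys with
  | nil => simp [PySem.List.insertBy]
  | cons y ys => by_cases h : before x y = true <;> simp [PySem.List.insertBy, h]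

-- if the last element of ys is one x would be inserted before, inserting x leaves the last element alone
theorem pv_getLast?_cons_cons {α : Type} (x y : α) (l : List α) :
    (x :: y :: l).getLast? = (y :: l).getLast? := rfl

theorem pv_getLast?_insertBy_of_before_last {α : Type} (before : α → α → Bool) (x b : α) (ys : List α)
    (hl : ys.getLast? = some b) (hb : before x b = true) :
    (PySem.List.insertBy before x ys).getLast? = some b := by
  induction ys with
  | nil => simp at hl
  | cons y ys ih =>
    by_cases h : before x y = true
    · simp only [PySem.List.insertBy, h, if_pos]
      simpa using hl
    · simp only [PySem.List.insertBy]
      rw [if_neg h]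
      cases ys with
      | nil =>
        obtain rfl : y = b := by simpa using hl
        exact absurd hb h
      | cons z zs =>
        have hrec := ih (by simpa using hl)
        cases hins : PySem.List.insertBy before x (z :: zs) with
        | nil => exact absurd hins (pv_insertBy_ne_nil before x (z :: zs))
        | cons w ws =>
          rw [hins] at hrec
          rw [pv_getLast?_cons_cons]
          exact hrec

-- the scan step of B
def pvStep (best v : String) : String := if PySem.Str.len best ≤ PySem.Str.len v then v else best

-- loop invariant: the last element of the insertion-sort accumulator is B's running maximum
theorem pv_invariant (l : List String) : ∀ (acc : List String) (best : String),
    acc.getLast? = some best → (∀ y ∈ acc, PySem.Str.len y ≤ PySem.Str.len best) →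
    (l.foldl (fun acc x => PySem.List.insertBy (fun a b => decide (PySem.Str.len a < PySem.Str.len b)) x acc) acc).getLast?
      = some (l.foldl pvStep best) ∧
    ∀ y ∈ (l.foldl (fun acc x => PySem.List.insertBy (fun a b => decide (PySem.Str.len a < PySem.Str.len b)) x acc) acc),
      PySem.Str.len y ≤ PySem.Str.len (l.foldl pvStep best) := by
  induction l with
  | nil => intro acc best h1 h2; exact ⟨h1, h2⟩
  | cons x l ih =>
    intro acc best h1 h2
    by_cases h : PySem.Str.len best ≤ PySem.Str.len x
    · have hins : PySem.List.insertBy (fun a b => decide (PySem.Str.len a < PySem.Str.len b)) x acc = acc ++ [x] := by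
        apply PySem.List.insertBy_of_forall_not_before
        intro y hy
        simp only [decide_eq_false_iff_not, not_lt]
        exact le_trans (h2 y hy) h
      have hstep : pvStep best x = x := by unfold pvStep; rw [if_pos h]
      simp only [List.foldl_cons, hins, hstep]
      apply ih
      · simp
      · intro y hy
        rcases List.mem_append.1 hy with hy | hy
        · exact le_trans (h2 y hy) h
        · simp at hy; simp [hy]
    · rw [not_le] at h
      have hins : (PySem.List.insertBy (fun a b => decide (PySem.Str.len a < PySem.Str.len b)) x acc).getLast? = some best :=
        pv_getLast?_insertBy_of_before_last _ x best acc h1 (by simpa using h)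
      have hstep : pvStep best x = best := by unfold pvStep; rw [if_neg (not_le.2 h)]
      simp only [List.foldl_cons, hstep]
      apply ih
      · exact hins
      · intro y hy
        rcases (PySem.List.mem_insertBy _ x y acc).1 hy with rfl | hy
        · exact le_of_lt h
        · exact h2 y hy

-- last of the stable sort by length = B's linear scan
theorem pv_sorted_getLast (v0 : String) (l : List String) :
    (PySem.List.sorted (v0 :: l) (fun v => PySem.Str.len v) false).getLast? = some (l.foldl pvStep v0) := by
  rw [PySem.List.sorted_eq_foldl_insertBy]
  simp only [List.foldl_cons]
  have h0 : PySem.List.insertBy (fun a b => decide (PySem.Str.len a < PySem.Str.len b)) v0 [] = [v0] := rfl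
  rw [h0]
  exact (pv_invariant l [v0] v0 (by simp) (by intro y hy; simp at hy; simp [hy])).1

-- xs[-1] is the last element
theorem pv_pyGet_neg_one {α : Type} (xs : List α) (h : xs ≠ []) :
    PySem.List.pyGet? xs (-1) = xs.getLast? := by
  have hlen : 0 < xs.length := List.length_pos_iff.2 h
  simp only [PySem.List.pyGet?, PySem.List.pyIdx?]
  rw [if_neg (by omega), if_pos (by simp; omega)]
  simp only [Option.bind_some]
  rw [List.getLast?_eq_getElem?]
  norm_num

-- a nonempty association list yields a dict with at least one entry
theorem pv_ofList_items_ne_nil {κ ν : Type} [BEq κ] (xs : List (κ × ν)) (h : xs ≠ []) :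
    (PySem.Dict.ofList xs).items ≠ [] := by
  have key : ∀ (l : List (κ × ν)) (d : PySem.Dict κ ν), d.items ≠ [] →
      (List.foldl (fun acc p => acc.insert p.1 p.2) d l).items ≠ [] := by
    intro l
    induction l with
    | nil => intro d hd; exact hd
    | cons p l ih =>
      intro d hd
      apply ih
      by_cases hc : d.contains p.1 = true <;> simp [PySem.Dict.insert, hc] <;> simp at hd <;> simp [hd]
  cases xs with
  | nil => exact absurd rfl h
  | cons p xs =>
    show (PySem.Dict.update _ _).items ≠ []
    simp only [PySem.Dict.update, List.foldl_cons]
    apply key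
    by_cases hc : (PySem.Dict.empty : PySem.Dict κ ν).contains p.1 = true <;>
      simp [PySem.Dict.insert, hc, PySem.Dict.empty]

-- ===== VERDICT (by name: the statement is the Claim_ definition above) =====
theorem get_rna_and_introns_spec : Claim_equal_get_rna_and_introns := by
  intro xs _ hpre
  unfold Spec_get_rna_and_introns get_rna_and_introns get_rna_and_introns_alt
  have hvals : (PySem.Dict.ofList xs).values ≠ [] := by
    have := pv_ofList_items_ne_nil xs hpre
    simp only [PySem.Dict.values]
    intro hc; exact this (List.map_eq_nil_iff.1 hc)
  cases hv : (PySem.Dict.ofList xs).values with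
  | nil => exact absurd hv hvals
  | cons v0 rest =>
    have hne : PySem.List.sorted (v0 :: rest) (fun v => PySem.Str.len v) false ≠ [] := by
      rw [Ne, PySem.List.sorted_eq_nil_iff]; simp
    have hrna : (PySem.List.pyGet? (PySem.List.sorted (v0 :: rest) (fun v => PySem.Str.len v) false) (-1)).getD ""
        = List.foldl (fun best v => if PySem.Str.len best ≤ PySem.Str.len v then v else best) v0 rest := by
      rw [pv_pyGet_neg_one _ hne, pv_sorted_getLast v0 rest]; rfl
    have hintr : ∀ rna : String, ((PySem.Dict.ofList xs).items.foldl
        (fun acc kv => if kv.2 ≠ rna then acc ++ [kv.2] else acc) ([] : List String))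
        = (v0 :: rest).filter (fun v => v ≠ rna) := by
      intro rna
      have hb := PySem.List.foldl_append_if (fun kv : String × String => decide (kv.2 ≠ rna))
        (fun kv => kv.2) (PySem.Dict.ofList xs).items []
      simp only [decide_eq_true_eq] at hb
      rw [hb, ← hv]
      simp only [PySem.Dict.values, List.filter_map]
      rfl
    simp only [hv, hrna, hintr]
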